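-- pv_equiv track=rewrite | github.com/pypi-data/pypi-mirror-401 | packages/regression-monkey/regression_monkey-0.1.1.tar.gz/regression_monkey-0.1.1/src/reg_monkey/baseline_spec.py | choose_k_subsets
-- ===== SOURCE A (Python) =====
-- from typing import List, Dict, Any, Iterable, Optional, Tuple, Callable
-- import hashlib,itertools,math
--
-- def choose_k_subsets(iterable: Iterable[Any], k: int, at_most: bool = False) -> Iterable[Tuple[Any, ...]]:
--     """选择固定 k 或最多 k 个元素的子集。"""
--     items = list(iterable)
--     if at_most:
--         for r in range(0, min(k, len(items)) + 1):
--             yield from itertools.combinations(items, r)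
--     else:
--         if k <= len(items):
--             yield from itertools.combinations(items, k)
-- ===== SOURCE B (Python) =====
-- def choose_k_subsets(iterable, k, at_most=False):
--     """Same subsets in the same order, via a hand-written structural recursion
--     (include-the-head branch first, then skip-the-head) instead of itertools."""
--     items = list(iterable)
--     if at_most:
--         for r in range(min(k, len(items)) + 1):
--             yield from _combs(items, r)
--     else:
--         if k <= len(items):
--             yield from _combs(items, k)
--
-- def _combs(items, r):
--     if r == 0:
--         yield ()
--     elif items:
--         head = items[0]
--         rest = items[1:]
--         for tail in _combs(rest, r - 1):
--             yield (head,) + tail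
--         yield from _combs(rest, r)
-- ===== Notes on version B (the rewrite author's own statement) =====
-- stated objective: alternative
-- what changed: Replaces itertools.combinations with a hand-written structural recursion on the item list (include-the-head branch first, then skip-the-head), yielding the same tuples in the same lexicographic-by-position order; Pre_ excludes at_most=False with k<0, where A raises ValueError.
import Mathlib
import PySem

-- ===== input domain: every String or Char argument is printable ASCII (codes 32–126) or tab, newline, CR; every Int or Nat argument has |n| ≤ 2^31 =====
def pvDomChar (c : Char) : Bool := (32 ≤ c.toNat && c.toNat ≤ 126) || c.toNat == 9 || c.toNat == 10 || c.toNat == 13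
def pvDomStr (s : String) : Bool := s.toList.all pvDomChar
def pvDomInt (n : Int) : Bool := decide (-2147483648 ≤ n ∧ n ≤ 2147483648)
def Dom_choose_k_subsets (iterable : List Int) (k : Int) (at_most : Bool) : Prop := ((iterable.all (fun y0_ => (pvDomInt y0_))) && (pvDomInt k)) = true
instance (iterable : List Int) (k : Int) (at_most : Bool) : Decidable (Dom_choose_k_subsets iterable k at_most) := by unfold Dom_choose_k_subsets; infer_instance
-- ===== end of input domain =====

-- B replaces itertools.combinations with a structural recursion on the item list; equivalence
-- is proved on Pre_, which excludes only the inputs where A raises (see the Pre_ comment).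

-- ===== PORT A =====
-- itertools.combinations(pool, r): all strictly increasing index tuples, lexicographic,
-- ported by recursion on r over explicit index ranges (exact: same tuples, same order).
def combIdx (n : Nat) : Nat → Nat → List (List Nat)
  | _, 0 => [[]]
  | start, r+1 => (List.range' start (n - start)).flatMap
      (fun i => (combIdx n (i+1) r).map (fun t => i :: t))

def combTuples (pool : List Int) (r : Nat) : List (List Int) :=
  (combIdx pool.length 0 r).map (List.map (fun i => pool.getD i 0))

def choose_k_subsets (iterable : List Int) (k : Int) (at_most : Bool) : List (List Int) :=
  let items := iterable
  if at_most then
    (PySem.List.pyRange 0 (min k (items.length : Int) + 1) 1).flatMap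
      (fun r => combTuples items r.toNat)
  else
    -- for k < 0 Python's combinations raises ValueError: outside Pre_
    if k ≤ (items.length : Int) then combTuples items k.toNat else []

-- ===== PORT B =====
-- _combs from Source B: r is a count; Source B's negative-r case (which yields nothing) is the
-- `0 ≤ k` test at the call site below, since Nat cannot encode a negative r.
def combRec : List Int → Nat → List (List Int)
  | _, 0 => [[]]
  | [], _+1 => []
  | x :: xs, r+1 => ((combRec xs r).map (fun t => x :: t)) ++ combRec xs (r+1)

def choose_k_subsets_alt (iterable : List Int) (k : Int) (at_most : Bool) : List (List Int) :=
  let items := iterable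
  if at_most then
    (PySem.List.pyRange 0 (min k (items.length : Int) + 1) 1).flatMap
      (fun r => combRec items r.toNat)
  else
    if k ≤ (items.length : Int) then
      (if 0 ≤ k then combRec items k.toNat else []) else []

-- ===== PRECONDITION & SPEC =====
-- Pre_ excludes exactly the inputs where A raises: at_most=False with k<0 makes
-- itertools.combinations raise ValueError.
def Pre_choose_k_subsets (iterable : List Int) (k : Int) (at_most : Bool) : Prop :=
  at_most = true ∨ 0 ≤ k
instance (iterable : List Int) (k : Int) (at_most : Bool) : Decidable (Pre_choose_k_subsets iterable k at_most) := by unfold Pre_choose_k_subsets; infer_instance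

def pvWitness_choose_k_subsets : List Int × Int × Bool := ([1, 2, 3], 2, false)

def Spec_choose_k_subsets (iterable : List Int) (k : Int) (at_most : Bool) (out : List (List Int)) : Prop := out = choose_k_subsets_alt iterable k at_most
instance (iterable : List Int) (k : Int) (at_most : Bool) (out : List (List Int)) : Decidable (Spec_choose_k_subsets iterable k at_most out) := by unfold Spec_choose_k_subsets; infer_instance

-- ===== CLAIM (what is proved, stated in full; the proofs are below) =====
def Claim_equal_choose_k_subsets : Prop := ∀ (iterable : List Int) (k : Int) (at_most : Bool), Dom_choose_k_subsets iterable k at_most → Pre_choose_k_subsets iterable k at_most → Spec_choose_k_subsets iterable k at_most (choose_k_subsets iterable k at_most)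


-- ===== LEMMAS AND PROOFS =====

-- succ-step of the main bridge, by induction on the number of remaining indices
lemma combIdx_succ_bridge (r : Nat)
    (IH : ∀ (pool : List Int) (s : Nat),
      (combIdx pool.length s r).map (List.map (fun i => pool.getD i 0)) = combRec (pool.drop s) r) :
    ∀ (t : Nat) (pool : List Int) (s : Nat), pool.length - s = t →
      (combIdx pool.length s (r+1)).map (List.map (fun i => pool.getD i 0))
        = combRec (pool.drop s) (r+1) := by
  intro t
  induction t with
  | zero =>
    intro pool s hs
    have hle : pool.length ≤ s := by omega
    have h1 : pool.length - s = 0 := by omega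
    have h2 : pool.drop s = [] := List.drop_eq_nil_of_le hle
    simp [combIdx, h1, h2, combRec]
  | succ t ih =>
    intro pool s hs
    have hlt : s < pool.length := by omega
    have hdrop : pool.drop s = pool[s] :: pool.drop (s+1) :=
      List.drop_eq_getElem_cons hlt
    have hrange : List.range' s (pool.length - s) = s :: List.range' (s+1) (pool.length - (s+1)) := by
      have : pool.length - s = (pool.length - (s+1)) + 1 := by omega
      rw [this, List.range'_succ]
    have hget : pool.getD s 0 = pool[s] := by
      simp [List.getD_eq_getElem?_getD, List.getElem?_eq_getElem hlt]
    calc (combIdx pool.length s (r+1)).map (List.map (fun i => pool.getD i 0))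
        = ((combIdx pool.length (s+1) r).map (fun t => s :: t)
             ++ combIdx pool.length (s+1) (r+1)).map (List.map (fun i => pool.getD i 0)) := by
          rw [combIdx, hrange]; simp [List.flatMap_cons, combIdx]
      _ = ((combIdx pool.length (s+1) r).map (List.map (fun i => pool.getD i 0))).map
             (fun t => pool.getD s 0 :: t)
           ++ (combIdx pool.length (s+1) (r+1)).map (List.map (fun i => pool.getD i 0)) := by
          simp [List.map_map, Function.comp]
      _ = (combRec (pool.drop (s+1)) r).map (fun t => pool[s] :: t)
           ++ combRec (pool.drop (s+1)) (r+1) := by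
          rw [IH pool (s+1), ih pool (s+1) (by omega), hget]
      _ = combRec (pool.drop s) (r+1) := by rw [hdrop, combRec]

lemma combIdx_bridge : ∀ (r : Nat) (pool : List Int) (s : Nat),
    (combIdx pool.length s r).map (List.map (fun i => pool.getD i 0)) = combRec (pool.drop s) r := by
  intro r
  induction r with
  | zero => intro pool s; simp [combIdx, combRec]
  | succ r ih => intro pool s; exact combIdx_succ_bridge r ih (pool.length - s) pool s rfl

lemma combTuples_eq_combRec (pool : List Int) (r : Nat) : combTuples pool r = combRec pool r := by
  have h := combIdx_bridge r pool 0
  simpa [combTuples] using h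

-- ===== VERDICT (by name: the statement is the Claim_ definition above) =====
theorem choose_k_subsets_spec : Claim_equal_choose_k_subsets := by
  intro iterable k at_most _ hpre
  unfold Spec_choose_k_subsets
  cases at_most
  · have hk : 0 ≤ k := by
      rcases hpre with h | h
      · exact absurd h (by simp)
      · exact h
    by_cases hkn : k ≤ (iterable.length : Int)
    · simp [choose_k_subsets, choose_k_subsets_alt, hkn, hk, combTuples_eq_combRec]
    · simp [choose_k_subsets, choose_k_subsets_alt, hkn]
  · simp [choose_k_subsets, choose_k_subsets_alt, combTuples_eq_combRec]
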